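-- pv_equiv track=rewrite | github.com/Tersect-Browser/Tersect-browser | backend/src/scripts/find_barcode.py | highlight_ref_alt_positions
-- ===== SOURCE A (Python) =====
-- def highlight_ref_alt_positions(seq, positions, barcode_start, variants):
--     highlighted = ''
--     for i, base in enumerate(seq):
--         abs_pos = barcode_start + i
--         if i in positions and abs_pos in variants:
--             ref_base, alt_base = variants[abs_pos]
--             highlighted += "[{}/{}]".format(ref_base, alt_base)
--         else:
--             highlighted += base
--     return highlighted
-- ===== SOURCE B (Python) =====
-- def highlight_ref_alt_positions(seq, positions, barcode_start, variants):
--     chars = list(seq)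
--     n = len(seq)
--     for p in positions:
--         if 0 <= p < n:
--             abs_pos = barcode_start + p
--             if abs_pos in variants:
--                 ref_base, alt_base = variants[abs_pos]
--                 chars[p] = "[{}/{}]".format(ref_base, alt_base)
--     return ''.join(chars)
-- ===== Notes on version B (the rewrite author's own statement) =====
-- stated objective: alternative
-- what changed: Instead of scanning every base of seq and testing each index for membership in positions, B copies seq into a mutable char list, patches only the slots named by positions (bounds-checked, variant looked up once per position), and joins the result.
import Mathlib
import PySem

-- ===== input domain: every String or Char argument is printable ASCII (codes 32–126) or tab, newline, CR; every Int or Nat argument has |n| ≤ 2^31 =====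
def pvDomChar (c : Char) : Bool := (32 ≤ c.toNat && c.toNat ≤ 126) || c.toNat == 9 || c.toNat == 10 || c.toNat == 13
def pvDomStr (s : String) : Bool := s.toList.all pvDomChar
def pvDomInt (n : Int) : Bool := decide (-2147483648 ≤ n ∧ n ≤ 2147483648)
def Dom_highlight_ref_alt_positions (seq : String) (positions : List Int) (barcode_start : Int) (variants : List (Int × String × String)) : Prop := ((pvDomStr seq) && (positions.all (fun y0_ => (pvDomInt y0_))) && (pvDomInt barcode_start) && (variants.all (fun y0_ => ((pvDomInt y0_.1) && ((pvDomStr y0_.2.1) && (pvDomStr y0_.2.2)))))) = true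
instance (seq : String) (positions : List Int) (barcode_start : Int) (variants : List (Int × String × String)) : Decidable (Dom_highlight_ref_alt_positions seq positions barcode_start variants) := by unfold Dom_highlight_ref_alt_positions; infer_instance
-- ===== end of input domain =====

-- B drives the work by the sparse position list, patching a mutable char array, instead of scanning seq and testing every base.

-- "[{}/{}]".format(ref, alt), as a list of code points (shared by both ports)
def pvBracket (r a : String) : List Char :=
  '[' :: r.toList ++ '/' :: a.toList ++ [']']

-- ===== PORT A =====
-- A's loop body: enumerate index as Int; dict membership/lookup = first match on the association list
def pvStepA (positions : List Int) (barcode_start : Int) (variants : List (Int × String × String))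
    (acc : List Char) (ib : Int × Char) : List Char :=
  let abs_pos := barcode_start + ib.1
  if ib.1 ∈ positions then
    match List.lookup abs_pos variants with
    | some (r, a) => acc ++ pvBracket r a
    | none => acc ++ [ib.2]
  else acc ++ [ib.2]

def highlight_ref_alt_positions (seq : String) (positions : List Int) (barcode_start : Int) (variants : List (Int × String × String)) : String :=
  String.ofList ((PySem.List.enumerate seq.toList).foldl (pvStepA positions barcode_start variants) [])

-- ===== PORT B =====
-- B's loop body: patch slot p of the char-string list if p is in range and the variant exists
def pvUpd (n : Int) (barcode_start : Int) (variants : List (Int × String × String))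
    (cs : List (List Char)) (p : Int) : List (List Char) :=
  if 0 ≤ p ∧ p < n then
    match List.lookup (barcode_start + p) variants with
    | some (r, a) => cs.set p.toNat (pvBracket r a)
    | none => cs
  else cs

def highlight_ref_alt_positions_alt (seq : String) (positions : List Int) (barcode_start : Int) (variants : List (Int × String × String)) : String :=
  String.ofList
    (positions.foldl (pvUpd (seq.toList.length : Int) barcode_start variants)
      (seq.toList.map (fun c => [c]))).flatten

-- ===== PRECONDITION & SPEC =====
def Spec_highlight_ref_alt_positions (seq : String) (positions : List Int) (barcode_start : Int) (variants : List (Int × String × String)) (out : String) : Prop := out = highlight_ref_alt_positions_alt seq positions barcode_start variants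
instance (seq : String) (positions : List Int) (barcode_start : Int) (variants : List (Int × String × String)) (out : String) : Decidable (Spec_highlight_ref_alt_positions seq positions barcode_start variants out) := by unfold Spec_highlight_ref_alt_positions; infer_instance

-- ===== CLAIM (what is proved, stated in full; the proofs are below) =====
def Claim_equal_highlight_ref_alt_positions : Prop := ∀ (seq : String) (positions : List Int) (barcode_start : Int) (variants : List (Int × String × String)), Dom_highlight_ref_alt_positions seq positions barcode_start variants → Spec_highlight_ref_alt_positions seq positions barcode_start variants (highlight_ref_alt_positions seq positions barcode_start variants)

-- ===== LEMMAS AND PROOFS =====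

-- the string both programs emit at index i, given the base c there
def pvCell (positions : List Int) (barcode_start : Int) (variants : List (Int × String × String))
    (i : Int) (c : Char) : List Char :=
  if i ∈ positions then
    match List.lookup (barcode_start + i) variants with
    | some (r, a) => pvBracket r a
    | none => [c]
  else [c]

lemma pvStepA_eq (positions : List Int) (bs : Int) (v : List (Int × String × String))
    (acc : List Char) (ib : Int × Char) :
    pvStepA positions bs v acc ib = acc ++ pvCell positions bs v ib.1 ib.2 := by
  simp only [pvStepA, pvCell]
  split_ifs with h
  · cases List.lookup (bs + ib.1) v with
    | none => rfl
    | some p => cases p; rfl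
  · rfl

lemma pvUpd_length (n bs : Int) (v : List (Int × String × String))
    (cs : List (List Char)) (p : Int) : (pvUpd n bs v cs p).length = cs.length := by
  simp only [pvUpd]
  split_ifs with h
  · cases List.lookup (bs + p) v with
    | none => rfl
    | some q => cases q; simp
  · rfl

lemma pvFold_length (n bs : Int) (v : List (Int × String × String))
    (ps : List Int) (cs : List (List Char)) :
    (ps.foldl (pvUpd n bs v) cs).length = cs.length := by
  induction ps generalizing cs with
  | nil => rfl
  | cons p ps ih => simp only [List.foldl_cons]; rw [ih, pvUpd_length]

lemma pvUpd_getElem? (n bs : Int) (v : List (Int × String × String))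
    (cs : List (List Char)) (p : Int) (hn : (cs.length : Int) = n)
    (i : Nat) (hi : i < cs.length) :
    (pvUpd n bs v cs p)[i]? =
      if p = (i : Int) then
        (match List.lookup (bs + (i : Int)) v with
         | some (r, a) => some (pvBracket r a)
         | none => cs[i]?)
      else cs[i]? := by
  by_cases hp : p = (i : Int)
  · subst hp
    simp only [pvUpd, Int.toNat_natCast]
    have hc : (0 : Int) ≤ (i : Int) ∧ (i : Int) < n := ⟨by omega, by omega⟩
    rw [if_pos hc]
    cases h : List.lookup (bs + (i : Int)) v with
    | none => rfl
    | some q => cases q; simp [hi]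
  · rw [if_neg hp]
    simp only [pvUpd]
    split_ifs with h
    · cases hl : List.lookup (bs + p) v with
      | none => rfl
      | some q =>
        cases q
        have hpn : p.toNat ≠ i := by omega
        simp [List.getElem?_set_ne hpn]
    · rfl

lemma pvFold_getElem? (n bs : Int) (v : List (Int × String × String))
    (ps : List Int) (cs : List (List Char)) (hn : (cs.length : Int) = n)
    (i : Nat) (hi : i < cs.length) :
    (ps.foldl (pvUpd n bs v) cs)[i]? =
      if (i : Int) ∈ ps then
        (match List.lookup (bs + (i : Int)) v with
         | some (r, a) => some (pvBracket r a)
         | none => cs[i]?)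
      else cs[i]? := by
  induction ps generalizing cs with
  | nil => simp
  | cons p ps ih =>
    simp only [List.foldl_cons]
    have hlen : (pvUpd n bs v cs p).length = cs.length := pvUpd_length ..
    have hn' : ((pvUpd n bs v cs p).length : Int) = n := by rw [hlen]; exact hn
    have hi' : i < (pvUpd n bs v cs p).length := by rw [hlen]; exact hi
    have key := ih (pvUpd n bs v cs p) hn' hi'
    rw [key, pvUpd_getElem? n bs v cs p hn i hi]
    cases h : List.lookup (bs + (i : Int)) v with
    | none =>
      simp only [List.mem_cons]
      split_ifs <;> rfl
    | some q =>
      cases q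
      simp only [List.mem_cons]
      split_ifs with h1 h2 h3 <;> simp_all

lemma pvAlt_list (seq : String) (positions : List Int) (bs : Int)
    (v : List (Int × String × String)) :
    positions.foldl (pvUpd (seq.toList.length : Int) bs v) (seq.toList.map (fun c => [c])) =
      (PySem.List.enumerate seq.toList).map (fun ib => pvCell positions bs v ib.1 ib.2) := by
  set l := seq.toList with hl
  apply List.ext_getElem?
  intro i
  by_cases hi : i < l.length
  · have hi' : i < (l.map (fun c => [c])).length := by simpa using hi
    have hn : (((l.map (fun c => [c])).length : Nat) : Int) = (l.length : Int) := by simp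
    rw [pvFold_getElem? (l.length : Int) bs v positions (l.map (fun c => [c])) hn i hi']
    rw [List.getElem?_map, List.getElem?_map, PySem.List.getElem?_enumerate]
    rw [List.getElem?_eq_getElem hi]
    simp only [Option.map_some, pvCell, zero_add]
    cases h : List.lookup (bs + (i : Int)) v with
    | none => split_ifs <;> rfl
    | some q => cases q; split_ifs <;> rfl
  · rw [List.getElem?_eq_none, List.getElem?_eq_none]
    · simp [PySem.List.length_enumerate]; omega
    · rw [pvFold_length]; simp; omega

theorem highlight_spec_aux (seq : String) (positions : List Int) (bs : Int)
    (v : List (Int × String × String)) :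
    highlight_ref_alt_positions seq positions bs v =
      highlight_ref_alt_positions_alt seq positions bs v := by
  unfold highlight_ref_alt_positions highlight_ref_alt_positions_alt
  rw [pvAlt_list]
  congr 1
  have hstep : ∀ (xs : List (Int × Char)) (acc : List Char),
      xs.foldl (pvStepA positions bs v) acc =
        acc ++ xs.flatMap (fun ib => pvCell positions bs v ib.1 ib.2) := by
    intro xs
    induction xs with
    | nil => intro acc; simp
    | cons x xs ih =>
      intro acc
      simp only [List.foldl_cons, List.flatMap_cons, pvStepA_eq, ih, List.append_assoc]
  rw [hstep]
  simp [List.flatMap_def]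

-- ===== VERDICT (by name: the statement is the Claim_ definition above) =====
theorem highlight_ref_alt_positions_spec : Claim_equal_highlight_ref_alt_positions := by
  intro seq positions bs v _
  unfold Spec_highlight_ref_alt_positions
  exact highlight_spec_aux seq positions bs v
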